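-- pv_equiv track=rewrite | github.com/mmroch4/university | introduction-to-programming/exercises/79/index.py | word_types
-- ===== SOURCE A (Python) =====
-- ORD_A = ord("A")
--
-- ORD_Z = ord("Z")
--
-- def word_types(lst):
--   t = [0, 0, 0]
--
--   for w in lst:
--     mode = -1
--
--     for c in w:
--       if ORD_A <= ord(c) <= ORD_Z:
--         if mode != -1 and mode != 1:
--           mode = 2
--           break
--
--         mode = 1
--       else:
--         if mode != -1 and mode != 0:
--           mode = 2
--           break
--
--         mode = 0
--
--     t[mode] += 1
--
--   return tuple(t)
-- ===== SOURCE B (Python) =====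
-- ORD_A = ord("A")
--
-- ORD_Z = ord("Z")
--
-- def word_types(lst):
--   t = [0, 0, 0]
--   for w in lst:
--     n_up = sum(1 for c in w if ORD_A <= ord(c) <= ORD_Z)
--     L = len(w)
--     if L == 0 or 0 < n_up < L:
--       t[2] += 1
--     elif n_up == L:
--       t[1] += 1
--     else:
--       t[0] += 1
--   return tuple(t)
-- ===== Notes on version B (the rewrite author's own statement) =====
-- stated objective: simpler
-- what changed: Replaces A's per-word mode state machine with early break (and the accidental-looking but intended t[-1] negative-index bump for empty words) by a measure-then-classify pass: count uppercase chars and the length, then pick the bucket arithmetically.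
import Mathlib
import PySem

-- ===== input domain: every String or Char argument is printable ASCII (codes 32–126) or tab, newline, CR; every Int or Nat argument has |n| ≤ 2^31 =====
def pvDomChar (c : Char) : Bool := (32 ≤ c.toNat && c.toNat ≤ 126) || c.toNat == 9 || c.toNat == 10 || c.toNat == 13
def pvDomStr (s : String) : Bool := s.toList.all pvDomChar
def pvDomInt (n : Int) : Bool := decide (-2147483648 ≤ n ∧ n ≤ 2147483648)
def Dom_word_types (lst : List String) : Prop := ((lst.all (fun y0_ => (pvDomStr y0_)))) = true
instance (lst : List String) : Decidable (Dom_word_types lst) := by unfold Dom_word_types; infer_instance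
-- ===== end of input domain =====

-- B replaces A's mode state machine by a count-then-classify decomposition (same cost, simpler).

-- ===== PORT A =====
-- shared char test: ORD_A <= ord(c) <= ORD_Z (identical in both Pythons)
def isUpAZ (c : Char) : Bool := 65 ≤ c.toNat && c.toNat ≤ 90

-- inner 'for c in w' loop with its break: returns the final mode
def wtMode : List Char → Int → Int
  | [], mode => mode
  | c :: cs, mode =>
    if isUpAZ c then
      if mode ≠ -1 ∧ mode ≠ 1 then 2          -- break with mode = 2
      else wtMode cs 1
    else
      if mode ≠ -1 ∧ mode ≠ 0 then 2          -- break with mode = 2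
      else wtMode cs 0

-- t[mode] += 1 : mode ∈ {-1,0,1,2}; Python's t[-1] is t[2], so mode -1 and 2 both bump the third slot
def wtBump (t : Int × Int × Int) (mode : Int) : Int × Int × Int :=
  if mode = 0 then (t.1 + 1, t.2.1, t.2.2)
  else if mode = 1 then (t.1, t.2.1 + 1, t.2.2)
  else (t.1, t.2.1, t.2.2 + 1)

def word_types (lst : List String) : Int × Int × Int :=
  lst.foldl (fun t w => wtBump t (wtMode w.toList (-1))) (0, 0, 0)

-- ===== PORT B =====
def word_types_alt (lst : List String) : Int × Int × Int :=
  lst.foldl (fun t w =>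
    let cs := w.toList
    let nUp : Int := (cs.filter isUpAZ).length
    let L : Int := cs.length
    if L = 0 ∨ (0 < nUp ∧ nUp < L) then (t.1, t.2.1, t.2.2 + 1)
    else if nUp = L then (t.1, t.2.1 + 1, t.2.2)
    else (t.1 + 1, t.2.1, t.2.2)) (0, 0, 0)

-- ===== PRECONDITION & SPEC =====
def Spec_word_types (lst : List String) (out : Int × Int × Int) : Prop := out = word_types_alt lst
instance (lst : List String) (out : Int × Int × Int) : Decidable (Spec_word_types lst out) := by unfold Spec_word_types; infer_instance

-- ===== CLAIM (what is proved, stated in full; the proofs are below) =====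
def Claim_equal_word_types : Prop := ∀ (lst : List String), Dom_word_types lst → Spec_word_types lst (word_types lst)

-- ===== LEMMAS AND PROOFS =====

lemma wtMode_one (cs : List Char) : wtMode cs 1 = if cs.all isUpAZ then 1 else 2 := by
  induction cs with
  | nil => simp [wtMode]
  | cons c cs ih =>
    by_cases h : isUpAZ c <;> simp [wtMode, h, ih]

lemma wtMode_zero (cs : List Char) : wtMode cs 0 = if cs.all (fun c => !isUpAZ c) then 0 else 2 := by
  induction cs with
  | nil => simp [wtMode]
  | cons c cs ih =>
    by_cases h : isUpAZ c <;> simp [wtMode, h, ih]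

lemma step_eq (t : Int × Int × Int) (w : String) :
    wtBump t (wtMode w.toList (-1)) =
      (let cs := w.toList
       let nUp : Int := (cs.filter isUpAZ).length
       let L : Int := cs.length
       if L = 0 ∨ (0 < nUp ∧ nUp < L) then (t.1, t.2.1, t.2.2 + 1)
       else if nUp = L then (t.1, t.2.1 + 1, t.2.2)
       else (t.1 + 1, t.2.1, t.2.2)) := by
  cases hcs : w.toList with
  | nil => simp [wtMode, wtBump]
  | cons c cs =>
    by_cases h : isUpAZ c
    · -- first char uppercase: mode becomes 1
      rw [show wtMode (c :: cs) (-1) = wtMode cs 1 by simp [wtMode, h]]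
      rw [wtMode_one]
      by_cases hall : cs.all isUpAZ
      · -- all uppercase: A picks bucket 1, nUp = L
        have hf : (c :: cs).filter isUpAZ = c :: cs := by
          simp [List.filter_eq_self, h]; intro a ha; exact List.all_eq_true.mp hall a ha
        simp [hall, wtBump, hf]
        omega
      · -- mixed: 0 < nUp < L
        have hlt : ((c :: cs).filter isUpAZ).length < (c :: cs).length := by
          refine lt_of_le_of_ne (List.length_filter_le _ _) ?_
          rw [Ne, List.length_filter_eq_length_iff]
          simp only [List.all_eq_true] at hall
          push Not at hall
          obtain ⟨a, ha, hna⟩ := hall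
          intro hforall
          exact hna (hforall a (by simp [ha]))
        have hpos : 0 < ((c :: cs).filter isUpAZ).length := by
          have : c ∈ (c :: cs).filter isUpAZ := by simp [h]
          exact List.length_pos_of_mem this
        rw [if_neg hall]
        rw [show wtBump t 2 = (t.1, t.2.1, t.2.2 + 1) from by norm_num [wtBump]]
        rw [if_pos]
        right; constructor <;> [exact_mod_cast hpos; exact_mod_cast hlt]
    · -- first char not uppercase: mode becomes 0
      rw [show wtMode (c :: cs) (-1) = wtMode cs 0 by simp [wtMode, h]]
      rw [wtMode_zero]
      have hlt : ((c :: cs).filter isUpAZ).length < (c :: cs).length := by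
        refine lt_of_le_of_ne (List.length_filter_le _ _) ?_
        rw [Ne, List.length_filter_eq_length_iff]
        intro hforall
        exact h (hforall c (by simp))
      by_cases hall : cs.all (fun c => !isUpAZ c)
      · -- no uppercase at all: A picks bucket 0, nUp = 0
        have hf : (c :: cs).filter isUpAZ = [] := by
          simp only [List.filter_eq_nil_iff]
          intro a ha
          rcases List.mem_cons.mp ha with rfl | ha'
          · simp [h]
          · have := List.all_eq_true.mp hall a ha'; simpa using this
        simp [hall, wtBump, hf]
        rw [if_neg (by omega), if_neg (by omega)]
      · -- mixed: 0 < nUp < L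
        have hpos : 0 < ((c :: cs).filter isUpAZ).length := by
          simp only [List.all_eq_true] at hall
          push Not at hall
          obtain ⟨a, ha, hna⟩ := hall
          have : a ∈ (c :: cs).filter isUpAZ := by
            simp only [List.mem_filter]
            exact ⟨by simp [ha], by simpa using hna⟩
          exact List.length_pos_of_mem this
        rw [if_neg hall]
        rw [show wtBump t 2 = (t.1, t.2.1, t.2.2 + 1) from by norm_num [wtBump]]
        rw [if_pos]
        right; constructor <;> [exact_mod_cast hpos; exact_mod_cast hlt]

lemma foldl_eq (lst : List String) (t : Int × Int × Int) :
    lst.foldl (fun t w => wtBump t (wtMode w.toList (-1))) t =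
    lst.foldl (fun t w =>
      let cs := w.toList
      let nUp : Int := (cs.filter isUpAZ).length
      let L : Int := cs.length
      if L = 0 ∨ (0 < nUp ∧ nUp < L) then (t.1, t.2.1, t.2.2 + 1)
      else if nUp = L then (t.1, t.2.1 + 1, t.2.2)
      else (t.1 + 1, t.2.1, t.2.2)) t := by
  induction lst generalizing t with
  | nil => rfl
  | cons w ws ih =>
    simp only [List.foldl_cons]
    rw [step_eq]
    exact ih _

-- ===== VERDICT (by name: the statement is the Claim_ definition above) =====
theorem word_types_spec : Claim_equal_word_types := by
  intro lst _
  unfold Spec_word_types word_types word_types_alt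
  exact foldl_eq lst (0, 0, 0)
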